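-- pv_equiv track=rewrite | github.com/KatarinaPopikova/word-correction | main.py | first_variation
-- ===== SOURCE A (Python) =====
-- import string
--
-- def lcs(word1, word2):
--     """ Find the Longest Common Subsequence
--
--     :param word1: word from the file
--     :param word2: word from the dictionary
--     :return: length of the longest common subsequence
--     """
--     m = len(word1)
--     n = len(word2)
--
--     length = [[0] * (n + 1) for _ in range(m + 1)]
--
--     for i in range(m + 1):
--         for j in range(n + 1):
--             if i == 0 or j == 0:
--                 length[i][j] = 0
--             elif word1[i - 1] == word2[j - 1]:
--                 length[i][j] = length[i - 1][j - 1] + 1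
--             else:
--                 length[i][j] = max(length[i - 1][j], length[i][j - 1])
--
--     return length[m][n]
--
-- def first_variation(word, dictionary_list):
--     """ Go through the words in the dictionary and find out the Longest Common Subsequence.
--     If the Longest Common Subsequence is the same as the word length, return the current word from the dictionary.
--     Otherwise, return with the best Longest Common Subsequence.
--
--     :param word: word to correct
--     :param dictionary_list: acceptable words for a file in list
--     :return: word with  best Longest Common Subsequence
--     """
--     change_word = ""
--     best_length = 0
--     for dic_word in dictionary_list:
--         length = lcs((word.strip(string.punctuation)).lower(), dic_word)
--         if length == len(word):
--             return dic_word
--         if best_length < length: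
--             change_word = dic_word
--             best_length = length
--     return change_word
-- ===== SOURCE B (Python) =====
-- import string
--
--
-- def lcs(word1, word2):
--     """Length of the longest common subsequence, by top-down memoized recursion
--     over index pairs instead of a bottom-up table fill."""
--     memo = {}
--
--     def rec(i, j):
--         if i == 0 or j == 0:
--             return 0
--         key = (i, j)
--         if key in memo:
--             return memo[key]
--         if word1[i - 1] == word2[j - 1]:
--             res = rec(i - 1, j - 1) + 1
--         else:
--             res = max(rec(i - 1, j), rec(i, j - 1))
--         memo[key] = res
--         return res
--
--     return rec(len(word1), len(word2))
--
--
-- def first_variation(word, dictionary_list):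
--     cleaned = word.strip(string.punctuation).lower()
--     target = len(word)
--     best_word = ""
--     best_len = 0
--     for dic_word in dictionary_list:
--         length = lcs(cleaned, dic_word)
--         if length == target:
--             return dic_word
--         if length > best_len:
--             best_word = dic_word
--             best_len = length
--     return best_word
-- ===== Notes on version B (the rewrite author's own statement) =====
-- stated objective: alternative
-- what changed: lcs is re-implemented as a top-down memoized recursion over index pairs (a dict memo) instead of A's bottom-up (m+1)x(n+1) table fill, and the strip/lower cleaning of the word is hoisted out of the dictionary loop.
import Mathlib
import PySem

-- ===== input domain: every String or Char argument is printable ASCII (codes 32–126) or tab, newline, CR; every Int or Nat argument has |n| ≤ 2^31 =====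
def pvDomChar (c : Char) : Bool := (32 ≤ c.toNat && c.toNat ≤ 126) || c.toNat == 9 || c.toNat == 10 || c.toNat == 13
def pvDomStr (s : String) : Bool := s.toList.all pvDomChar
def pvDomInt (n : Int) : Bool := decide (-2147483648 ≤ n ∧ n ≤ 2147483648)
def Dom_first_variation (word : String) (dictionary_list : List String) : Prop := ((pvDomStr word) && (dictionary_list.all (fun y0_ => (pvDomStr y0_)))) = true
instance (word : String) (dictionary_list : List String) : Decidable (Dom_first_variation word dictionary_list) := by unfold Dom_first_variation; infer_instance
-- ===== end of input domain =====

-- B replaces A's bottom-up LCS table fill by a top-down memoized recursion over index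
-- pairs and hoists the strip/lower cleaning out of the dictionary loop (alternative decomposition).

-- ===== PORT A =====
-- string.punctuation
def pvPunct : String := "!\"#$%&'()*+,-./:;<=>?@[\\]^_`{|}~"

-- length[i][j] read (always in range in A)
def lcsGetA (L : List (List Int)) (i j : Nat) : Int := (L.getD i []).getD j 0
-- length[i][j] = v  (always in range in A)
def lcsSetA (L : List (List Int)) (i j : Nat) (v : Int) : List (List Int) :=
  L.set i ((L.getD i []).set j v)

-- A's lcs: bottom-up table, two nested loops
def lcsA (word1 word2 : String) : Int :=
  let w1 := word1.toList
  let w2 := word2.toList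
  let m := w1.length
  let n := w2.length
  let init : List (List Int) := List.replicate (m + 1) (List.replicate (n + 1) (0 : Int))
  let tbl := (List.range (m + 1)).foldl (fun L i =>
      (List.range (n + 1)).foldl (fun L j =>
        if i = 0 ∨ j = 0 then lcsSetA L i j 0
        else if w1[i - 1]? = w2[j - 1]? then lcsSetA L i j (lcsGetA L (i - 1) (j - 1) + 1)
        else lcsSetA L i j (max (lcsGetA L (i - 1) j) (lcsGetA L i (j - 1)))) L) init
  lcsGetA tbl m n

-- A's loop over the dictionary (early return via recursion)
def fvLoopA (word : String) : List String → String → Int → String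
  | [], change_word, _ => change_word
  | dic_word :: rest, change_word, best_length =>
    let length := lcsA (PySem.Str.lower (PySem.Str.stripChars word pvPunct)) dic_word
    if length = PySem.Str.len word then dic_word
    else if best_length < length then fvLoopA word rest dic_word length
    else fvLoopA word rest change_word best_length

def first_variation (word : String) (dictionary_list : List String) : String :=
  fvLoopA word dictionary_list "" 0

-- ===== PORT B =====
-- B's rec(i, j) with the memo dict threaded through
def lcsRecB (w1 w2 : List Char) (i j : Nat) (memo : PySem.Dict (Nat × Nat) Int) :
    Int × PySem.Dict (Nat × Nat) Int :=
  if h : i = 0 ∨ j = 0 then (0, memo)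
  else
    match memo.get? (i, j) with
    | some v => (v, memo)
    | none =>
      let rm :=
        if w1[i - 1]? = w2[j - 1]? then
          let r := lcsRecB w1 w2 (i - 1) (j - 1) memo
          (r.1 + 1, r.2)
        else
          let r1 := lcsRecB w1 w2 (i - 1) j memo
          let r2 := lcsRecB w1 w2 i (j - 1) r1.2
          (max r1.1 r2.1, r2.2)
      (rm.1, rm.2.insert (i, j) rm.1)
termination_by i + j
decreasing_by all_goals omega

-- B's lcs: top-down memoized recursion
def lcsB (word1 word2 : String) : Int :=
  (lcsRecB word1.toList word2.toList word1.toList.length word2.toList.length PySem.Dict.empty).1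

-- B's loop over the dictionary, cleaning and target hoisted out
def fvLoopB (cleaned : String) (target : Int) : List String → String → Int → String
  | [], best_word, _ => best_word
  | dic_word :: rest, best_word, best_len =>
    let length := lcsB cleaned dic_word
    if length = target then dic_word
    else if length > best_len then fvLoopB cleaned target rest dic_word length
    else fvLoopB cleaned target rest best_word best_len

def first_variation_alt (word : String) (dictionary_list : List String) : String :=
  fvLoopB (PySem.Str.lower (PySem.Str.stripChars word pvPunct)) (PySem.Str.len word)
    dictionary_list "" 0

-- ===== PRECONDITION & SPEC =====
def Spec_first_variation (word : String) (dictionary_list : List String) (out : String) : Prop := out = first_variation_alt word dictionary_list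
instance (word : String) (dictionary_list : List String) (out : String) : Decidable (Spec_first_variation word dictionary_list out) := by unfold Spec_first_variation; infer_instance

-- ===== CLAIM (what is proved, stated in full; the proofs are below) =====
def Claim_equal_first_variation : Prop := ∀ (word : String) (dictionary_list : List String), Dom_first_variation word dictionary_list → Spec_first_variation word dictionary_list (first_variation word dictionary_list)

-- ===== LEMMAS AND PROOFS =====

-- the mathematical LCS-of-prefixes value both ports compute
def lcsP (w1 w2 : List Char) (i j : Nat) : Int :=
  if h : i = 0 ∨ j = 0 then 0
  else if w1[i - 1]? = w2[j - 1]? then lcsP w1 w2 (i - 1) (j - 1) + 1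
  else max (lcsP w1 w2 (i - 1) j) (lcsP w1 w2 i (j - 1))
termination_by i + j
decreasing_by all_goals omega

theorem lcsP_zero (w1 w2 : List Char) (i j : Nat) (h : i = 0 ∨ j = 0) :
    lcsP w1 w2 i j = 0 := by
  rw [lcsP.eq_def]; simp [h]

theorem lcsP_succ (w1 w2 : List Char) (i j : Nat) (hi : i ≠ 0) (hj : j ≠ 0) :
    lcsP w1 w2 i j =
      if w1[i - 1]? = w2[j - 1]? then lcsP w1 w2 (i - 1) (j - 1) + 1
      else max (lcsP w1 w2 (i - 1) j) (lcsP w1 w2 i (j - 1)) := by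
  rw [lcsP.eq_def]; simp [hi, hj]

-- ===== A-side: the table fill computes lcsP =====

-- the inner-loop body of lcsA, named for the proofs
def innerB (w1 w2 : List Char) (i : Nat) (L : List (List Int)) (j : Nat) : List (List Int) :=
  if i = 0 ∨ j = 0 then lcsSetA L i j 0
  else if w1[i - 1]? = w2[j - 1]? then lcsSetA L i j (lcsGetA L (i - 1) (j - 1) + 1)
  else lcsSetA L i j (max (lcsGetA L (i - 1) j) (lcsGetA L i (j - 1)))

theorem lcsA_eq (word1 word2 : String) :
    lcsA word1 word2 =
      lcsGetA ((List.range (word1.toList.length + 1)).foldl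
          (fun L i => (List.range (word2.toList.length + 1)).foldl
            (innerB word1.toList word2.toList i) L)
          (List.replicate (word1.toList.length + 1)
            (List.replicate (word2.toList.length + 1) (0 : Int))))
        word1.toList.length word2.toList.length := rfl

def ShapeT (m n : Nat) (L : List (List Int)) : Prop :=
  L.length = m + 1 ∧ ∀ r ∈ L, r.length = n + 1

theorem row_len (m n : Nat) (L : List (List Int)) (hS : ShapeT m n L) (i : Nat)
    (hi : i ≤ m) : (L.getD i []).length = n + 1 := by
  obtain ⟨h1, h2⟩ := hS
  have hlt : i < L.length := by omega
  rw [List.getD_eq_getElem?_getD, List.getElem?_eq_getElem hlt]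
  exact h2 _ (L.getElem_mem hlt)

theorem shape_set (m n : Nat) (L : List (List Int)) (hS : ShapeT m n L)
    (i j : Nat) (hi : i ≤ m) (v : Int) : ShapeT m n (lcsSetA L i j v) := by
  obtain ⟨h1, h2⟩ := hS
  refine ⟨by simp [lcsSetA, h1], ?_⟩
  intro r hr
  rcases List.mem_or_eq_of_mem_set hr with h | h
  · exact h2 _ h
  · subst h
    rw [List.length_set]
    exact row_len m n L ⟨h1, h2⟩ i hi

theorem getA_set_self (L : List (List Int)) (i j : Nat) (v : Int)
    (hi : i < L.length) (hj : j < (L.getD i []).length) :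
    lcsGetA (lcsSetA L i j v) i j = v := by
  simp only [List.getD_eq_getElem?_getD] at hj
  simp only [lcsGetA, lcsSetA, List.getD_eq_getElem?_getD]
  rw [List.getElem?_set_self hi]
  simp only [Option.getD_some]
  rw [List.getElem?_set_self hj]
  rfl

theorem getA_set_ne (L : List (List Int)) (i j k l : Nat) (v : Int)
    (h : ¬(k = i ∧ l = j)) :
    lcsGetA (lcsSetA L i j v) k l = lcsGetA L k l := by
  simp only [lcsGetA, lcsSetA, List.getD_eq_getElem?_getD]
  by_cases hk : k = i
  · subst hk
    have hl : l ≠ j := fun hl => h ⟨rfl, hl⟩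
    by_cases hin : k < L.length
    · rw [List.getElem?_set_self hin]
      simp only [Option.getD_some]
      rw [List.getElem?_set_ne (fun hh => hl hh.symm)]
    · rw [List.set_eq_of_length_le (by omega)]
  · rw [List.getElem?_set_ne (fun hh => hk hh.symm)]

theorem getA_init (m n k l : Nat) :
    lcsGetA (List.replicate (m + 1) (List.replicate (n + 1) (0 : Int))) k l = 0 := by
  simp only [lcsGetA, List.getD_eq_getElem?_getD, List.getElem?_replicate]
  split_ifs <;> simp [List.getElem?_replicate] <;> split_ifs <;> simp

theorem inner_ok (w1 w2 : List Char) (m n i : Nat) (hi : i ≤ m)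
    (j0 : Nat) (hj0 : j0 ≤ n + 1) (L : List (List Int))
    (hS : ShapeT m n L)
    (hprev : ∀ l, l ≤ n → lcsGetA L (i - 1) l = lcsP w1 w2 (i - 1) l) :
    ShapeT m n ((List.range j0).foldl (innerB w1 w2 i) L) ∧
    (∀ k l, k ≠ i →
      lcsGetA ((List.range j0).foldl (innerB w1 w2 i) L) k l = lcsGetA L k l) ∧
    (∀ l, l < j0 →
      lcsGetA ((List.range j0).foldl (innerB w1 w2 i) L) i l = lcsP w1 w2 i l) := by
  induction j0 with
  | zero => exact ⟨hS, fun _ _ _ => rfl, fun _ h => absurd h (by omega)⟩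
  | succ j0 ih =>
    have hj0' : j0 ≤ n := by omega
    obtain ⟨ihS, ihK, ihI⟩ := ih (by omega)
    set L1 := (List.range j0).foldl (innerB w1 w2 i) L with hL1
    have hfold : (List.range (j0 + 1)).foldl (innerB w1 w2 i) L = innerB w1 w2 i L1 j0 := by
      rw [List.range_succ, List.foldl_append]; rfl
    have hiL1 : i < L1.length := by
      obtain ⟨h1, _⟩ := ihS; omega
    have hjL1 : j0 < (L1.getD i []).length := by
      rw [row_len m n L1 ihS i hi]; omega
    -- the value written at (i, j0) is lcsP w1 w2 i j0, whatever the branch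
    have hval : lcsGetA (innerB w1 w2 i L1 j0) i j0 = lcsP w1 w2 i j0 ∧
        ShapeT m n (innerB w1 w2 i L1 j0) ∧
        (∀ k l, ¬(k = i ∧ l = j0) →
          lcsGetA (innerB w1 w2 i L1 j0) k l = lcsGetA L1 k l) := by
      unfold innerB
      by_cases h0 : i = 0 ∨ j0 = 0
      · rw [if_pos h0]
        exact ⟨by rw [getA_set_self _ _ _ _ hiL1 hjL1, lcsP_zero _ _ _ _ h0],
          shape_set m n L1 ihS i j0 hi 0,
          fun k l h => getA_set_ne L1 i j0 k l 0 h⟩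
      · obtain ⟨hi0, hj00⟩ := not_or.mp h0
        have hne : (i : Nat) - 1 ≠ i := by omega
        have hread1 : lcsGetA L1 (i - 1) (j0 - 1) = lcsP w1 w2 (i - 1) (j0 - 1) := by
          rw [ihK _ _ hne]; exact hprev _ (by omega)
        have hread2 : lcsGetA L1 (i - 1) j0 = lcsP w1 w2 (i - 1) j0 := by
          rw [ihK _ _ hne]; exact hprev _ hj0'
        have hread3 : lcsGetA L1 i (j0 - 1) = lcsP w1 w2 i (j0 - 1) :=
          ihI _ (by omega)
        rw [if_neg (by omega : ¬(i = 0 ∨ j0 = 0))]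
        by_cases hc : w1[i - 1]? = w2[j0 - 1]?
        · rw [if_pos hc]
          refine ⟨?_, shape_set m n L1 ihS i j0 hi _,
            fun k l h => getA_set_ne L1 i j0 k l _ h⟩
          rw [getA_set_self _ _ _ _ hiL1 hjL1, hread1,
            lcsP_succ w1 w2 i j0 hi0 hj00, if_pos hc]
        · rw [if_neg hc]
          refine ⟨?_, shape_set m n L1 ihS i j0 hi _,
            fun k l h => getA_set_ne L1 i j0 k l _ h⟩
          rw [getA_set_self _ _ _ _ hiL1 hjL1, hread2, hread3,
            lcsP_succ w1 w2 i j0 hi0 hj00, if_neg hc]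
    obtain ⟨hv, hvS, hvK⟩ := hval
    refine ⟨by rw [hfold]; exact hvS, ?_, ?_⟩
    · intro k l hk
      rw [hfold, hvK k l (fun hh => hk hh.1), ihK k l hk]
    · intro l hl
      rcases Nat.lt_succ_iff_lt_or_eq.mp hl with hl' | hl'
      · rw [hfold, hvK i l (fun hh => by omega), ihI l hl']
      · subst hl'; rw [hfold]; exact hv

theorem outer_ok (w1 w2 : List Char) (m n : Nat) (i0 : Nat) (hi0 : i0 ≤ m + 1) :
    ShapeT m n ((List.range i0).foldl
      (fun L i => (List.range (n + 1)).foldl (innerB w1 w2 i) L)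
      (List.replicate (m + 1) (List.replicate (n + 1) (0 : Int)))) ∧
    ∀ k l, k < i0 → l ≤ n →
      lcsGetA ((List.range i0).foldl
        (fun L i => (List.range (n + 1)).foldl (innerB w1 w2 i) L)
        (List.replicate (m + 1) (List.replicate (n + 1) (0 : Int)))) k l =
      lcsP w1 w2 k l := by
  induction i0 with
  | zero =>
    refine ⟨⟨by simp, ?_⟩, fun _ _ h _ => absurd h (by omega)⟩
    intro r hr
    rw [List.eq_of_mem_replicate hr]
    simp
  | succ i0 ih =>
    obtain ⟨ihS, ihV⟩ := ih (by omega)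
    set L0 := (List.range i0).foldl
      (fun L i => (List.range (n + 1)).foldl (innerB w1 w2 i) L)
      (List.replicate (m + 1) (List.replicate (n + 1) (0 : Int))) with hL0
    have hfold : (List.range (i0 + 1)).foldl
        (fun L i => (List.range (n + 1)).foldl (innerB w1 w2 i) L)
        (List.replicate (m + 1) (List.replicate (n + 1) (0 : Int))) =
        (List.range (n + 1)).foldl (innerB w1 w2 i0) L0 := by
      rw [(List.range_succ : List.range (i0 + 1) = _), List.foldl_append]; rfl
    have hi0m : i0 ≤ m := by omega
    have hprev : ∀ l, l ≤ n → lcsGetA L0 (i0 - 1) l = lcsP w1 w2 (i0 - 1) l := by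
      intro l hl
      by_cases hz : i0 = 0
      · subst hz
        simp only [hL0, List.range_zero, List.foldl_nil]
        rw [getA_init, lcsP_zero w1 w2 _ l (Or.inl rfl)]
      · exact ihV _ _ (by omega) hl
    obtain ⟨hS', hK', hI'⟩ := inner_ok w1 w2 m n i0 hi0m (n + 1) le_rfl L0 ihS hprev
    refine ⟨by rw [hfold]; exact hS', ?_⟩
    intro k l hk hl
    rcases Nat.lt_succ_iff_lt_or_eq.mp hk with hk' | hk'
    · rw [hfold, hK' k l (by omega), ihV k l hk' hl]
    · subst hk'; rw [hfold]; exact hI' l (by omega)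

theorem lcsA_eq_lcsP (word1 word2 : String) :
    lcsA word1 word2 =
      lcsP word1.toList word2.toList word1.toList.length word2.toList.length := by
  rw [lcsA_eq]
  exact (outer_ok word1.toList word2.toList word1.toList.length word2.toList.length
    (word1.toList.length + 1) le_rfl).2 _ _ (by omega) le_rfl

-- ===== B-side: the memoized recursion computes lcsP =====

theorem lcsRecB_ok (w1 w2 : List Char) (N : Nat) :
    ∀ i j (memo : PySem.Dict (Nat × Nat) Int), i + j ≤ N →
    (∀ k l v, memo.get? (k, l) = some v → v = lcsP w1 w2 k l) →
    (lcsRecB w1 w2 i j memo).1 = lcsP w1 w2 i j ∧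
    (∀ k l v, (lcsRecB w1 w2 i j memo).2.get? (k, l) = some v → v = lcsP w1 w2 k l) := by
  induction N with
  | zero =>
    intro i j memo hN hm
    have hi : i = 0 := by omega
    rw [lcsRecB.eq_def]
    subst hi
    simp only [true_or, dite_true]
    exact ⟨(lcsP_zero w1 w2 0 j (Or.inl rfl)).symm, hm⟩
  | succ N ih =>
    intro i j memo hN hm
    rw [lcsRecB.eq_def]
    by_cases h0 : i = 0 ∨ j = 0
    · rw [dif_pos h0]
      exact ⟨(lcsP_zero w1 w2 i j h0).symm, hm⟩
    · rw [dif_neg h0]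
      obtain ⟨hi0, hj0⟩ := not_or.mp h0
      cases hget : memo.get? (i, j) with
      | some v =>
        simp only []
        exact ⟨hm i j v hget, hm⟩
      | none =>
        simp only []
        by_cases hc : w1[i - 1]? = w2[j - 1]?
        · rw [if_pos hc]
          obtain ⟨h1, h2⟩ := ih (i - 1) (j - 1) memo (by omega) hm
          constructor
          · simp only [h1, lcsP_succ w1 w2 i j hi0 hj0, if_pos hc]
          · intro k l v hv
            rw [PySem.Dict.get?_insert] at hv
            split_ifs at hv with hkl
            · have hk : k = i := congrArg Prod.fst hkl
              have hl : l = j := congrArg Prod.snd hkl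
              cases hv
              subst hk; subst hl
              rw [lcsP_succ w1 w2 _ _ hi0 hj0, if_pos hc]
              simp [h1]
            · exact h2 k l v hv
        · rw [if_neg hc]
          obtain ⟨h1, h2⟩ := ih (i - 1) j memo (by omega) hm
          obtain ⟨h3, h4⟩ := ih i (j - 1) (lcsRecB w1 w2 (i - 1) j memo).2 (by omega) h2
          constructor
          · simp only [h1, h3, lcsP_succ w1 w2 i j hi0 hj0, if_neg hc]
          · intro k l v hv
            rw [PySem.Dict.get?_insert] at hv
            split_ifs at hv with hkl
            · have hk : k = i := congrArg Prod.fst hkl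
              have hl : l = j := congrArg Prod.snd hkl
              cases hv
              subst hk; subst hl
              rw [lcsP_succ w1 w2 _ _ hi0 hj0, if_neg hc]
              simp [h1, h3]
            · exact h4 k l v hv

theorem lcsB_eq_lcsP (word1 word2 : String) :
    lcsB word1 word2 =
      lcsP word1.toList word2.toList word1.toList.length word2.toList.length := by
  unfold lcsB
  exact (lcsRecB_ok word1.toList word2.toList
    (word1.toList.length + word2.toList.length) _ _ PySem.Dict.empty le_rfl
    (fun k l v hv => by simp [PySem.Dict.get?_empty] at hv)).1

theorem lcs_eq (word1 word2 : String) : lcsA word1 word2 = lcsB word1 word2 := by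
  rw [lcsA_eq_lcsP, lcsB_eq_lcsP]

-- ===== the dictionary loops agree =====

theorem fvLoop_eq (word : String) (l : List String) (cw : String) (bl : Int) :
    fvLoopA word l cw bl =
      fvLoopB (PySem.Str.lower (PySem.Str.stripChars word pvPunct))
        (PySem.Str.len word) l cw bl := by
  induction l generalizing cw bl with
  | nil => rfl
  | cons d rest ih =>
    simp only [fvLoopA, fvLoopB, lcs_eq, gt_iff_lt]
    split_ifs <;> first | rfl | exact ih _ _

-- ===== VERDICT (by name: the statement is the Claim_ definition above) =====
theorem first_variation_spec : Claim_equal_first_variation := by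
  intro word dictionary_list _
  unfold Spec_first_variation first_variation first_variation_alt
  exact fvLoop_eq word dictionary_list "" 0
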